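-- pv_equiv track=rewrite | github.com/jordanlgraves/geneforge | src/library/llm_library_selector.py | _has_inducers
-- ===== SOURCE A (Python) =====
-- from typing import Dict, List, Optional, Union, Any, Tuple
--
-- def _has_inducers(library_data: Dict[str, Any]) -> Dict[str, bool]:
--     """
--     Check if a library has common inducers.
--
--     Args:
--         library_data: Library data dictionary
--
--     Returns:
--         Dict mapping inducer types to booleans
--     """
--     inducers = {
--         "arabinose": False,
--         "iptg": False,
--         "atc": False,
--         "hsl": False
--     }
--
--     # Handle different library data structures
--     parts = []
--     if "parts" in library_data:
--         parts_data = library_data["parts"]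
--         if isinstance(parts_data, list):
--             parts = parts_data
--         elif isinstance(parts_data, dict) and "parts" in parts_data:
--             parts = parts_data["parts"]
--
--     for part in parts:
--         part_id = ""
--         if isinstance(part, dict):
--             part_id = part.get("id", part.get("name", "")).lower()
--         elif isinstance(part, str):
--             part_id = part.lower()
--
--         if any(term in part_id for term in ["arabinose", "pbad"]):
--             inducers["arabinose"] = True
--         if any(term in part_id for term in ["iptg", "ptac", "plac"]):
--             inducers["iptg"] = True
--         if any(term in part_id for term in ["atc", "ptet"]):
--             inducers["atc"] = True
--         if any(term in part_id for term in ["hsl", "plux"]):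
--             inducers["hsl"] = True
--
--     return inducers
-- ===== SOURCE B (Python) =====
-- def _has_inducers(library_data):
--     """Concatenate all normalized part ids into one newline-joined haystack and
--     answer each inducer term with a single substring search on that haystack;
--     correct because no search term contains a newline, so a match can never
--     span the boundary between two ids."""
--     parts = []
--     if "parts" in library_data:
--         parts_data = library_data["parts"]
--         if isinstance(parts_data, list):
--             parts = parts_data
--         elif isinstance(parts_data, dict) and "parts" in parts_data:
--             parts = parts_data["parts"]
--
--     haystack = "\n".join(
--         part.get("id", part.get("name", "")).lower() if isinstance(part, dict)
--         else part.lower() if isinstance(part, str)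
--         else ""
--         for part in parts)
--
--     return {key: any(term in haystack for term in terms)
--             for key, terms in [("arabinose", ["arabinose", "pbad"]),
--                                ("iptg", ["iptg", "ptac", "plac"]),
--                                ("atc", ["atc", "ptet"]),
--                                ("hsl", ["hsl", "plux"])]}
-- ===== Notes on version B (the rewrite author's own statement) =====
-- stated objective: alternative
-- what changed: A scans each part separately and mutates four flags per part; B joins all normalized ids into one newline-separated haystack string and answers each inducer with a single substring search per term over that one string (sound since no term contains a newline).
import Mathlib
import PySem

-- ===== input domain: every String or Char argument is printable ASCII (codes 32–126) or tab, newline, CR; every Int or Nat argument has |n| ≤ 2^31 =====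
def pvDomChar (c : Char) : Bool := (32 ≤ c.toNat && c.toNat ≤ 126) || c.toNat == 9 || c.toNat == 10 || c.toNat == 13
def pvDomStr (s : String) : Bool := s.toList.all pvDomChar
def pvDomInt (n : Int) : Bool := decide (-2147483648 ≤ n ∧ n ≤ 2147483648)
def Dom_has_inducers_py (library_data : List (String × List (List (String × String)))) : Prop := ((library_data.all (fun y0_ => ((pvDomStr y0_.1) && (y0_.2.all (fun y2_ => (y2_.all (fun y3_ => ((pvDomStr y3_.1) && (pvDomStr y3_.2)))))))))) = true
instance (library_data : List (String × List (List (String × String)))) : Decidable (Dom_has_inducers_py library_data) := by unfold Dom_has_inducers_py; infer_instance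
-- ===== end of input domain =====

-- B replaces A's per-part flag-mutating loop by one newline-joined haystack of all
-- normalized ids and a single substring search per inducer term on that one string.

-- ===== PORT A =====
-- A's loop body: compute the normalized id and set each inducer flag that a term group hits.
-- (At this typed domain parts_data is always a list and every part is a dict, so the
-- isinstance branches of A collapse to the dict path.)
def pvStepA (d : PySem.Dict String Bool) (part : List (String × String)) : PySem.Dict String Bool :=
  let part_id := PySem.Str.lower (PySem.Dict.getD ⟨part⟩ "id" (PySem.Dict.getD ⟨part⟩ "name" ""))
  let d := if ["arabinose", "pbad"].any (fun term => PySem.Str.isIn term part_id) then d.insert "arabinose" true else d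
  let d := if ["iptg", "ptac", "plac"].any (fun term => PySem.Str.isIn term part_id) then d.insert "iptg" true else d
  let d := if ["atc", "ptet"].any (fun term => PySem.Str.isIn term part_id) then d.insert "atc" true else d
  let d := if ["hsl", "plux"].any (fun term => PySem.Str.isIn term part_id) then d.insert "hsl" true else d
  d

def has_inducers_py (library_data : List (String × List (List (String × String)))) : List (String × Bool) :=
  let inducers : PySem.Dict String Bool :=
    PySem.Dict.ofList [("arabinose", false), ("iptg", false), ("atc", false), ("hsl", false)]
  let parts : List (List (String × String)) :=
    match PySem.Dict.get? ⟨library_data⟩ "parts" with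
    | some parts_data => parts_data
    | none => []
  (parts.foldl pvStepA inducers).items

-- ===== PORT B =====
def pvPartId (part : List (String × String)) : String :=
  PySem.Str.lower (PySem.Dict.getD ⟨part⟩ "id" (PySem.Dict.getD ⟨part⟩ "name" ""))

def pvGroups : List (String × List String) :=
  [("arabinose", ["arabinose", "pbad"]), ("iptg", ["iptg", "ptac", "plac"]),
   ("atc", ["atc", "ptet"]), ("hsl", ["hsl", "plux"])]

def has_inducers_py_alt (library_data : List (String × List (List (String × String)))) : List (String × Bool) :=
  let parts : List (List (String × String)) :=
    match PySem.Dict.get? ⟨library_data⟩ "parts" with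
    | some parts_data => parts_data
    | none => []
  let haystack := PySem.Str.join "\n" (parts.map pvPartId)
  pvGroups.map (fun g => (g.1, g.2.any (fun term => PySem.Str.isIn term haystack)))

-- ===== PRECONDITION & SPEC =====
def Spec_has_inducers_py (library_data : List (String × List (List (String × String)))) (out : List (String × Bool)) : Prop := out = has_inducers_py_alt library_data
instance (library_data : List (String × List (List (String × String)))) (out : List (String × Bool)) : Decidable (Spec_has_inducers_py library_data out) := by unfold Spec_has_inducers_py; infer_instance

-- ===== CLAIM (what is proved, stated in full; the proofs are below) =====
def Claim_equal_has_inducers_py : Prop := ∀ (library_data : List (String × List (List (String × String)))), Dom_has_inducers_py library_data → Spec_has_inducers_py library_data (has_inducers_py library_data)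

-- ===== LEMMAS AND PROOFS =====
def pvHit (terms : List String) (part : List (String × String)) : Bool :=
  terms.any (fun term => PySem.Str.isIn term (pvPartId part))

lemma pvStepA_eval (b1 b2 b3 b4 : Bool) (part : List (String × String)) :
    pvStepA ⟨[("arabinose", b1), ("iptg", b2), ("atc", b3), ("hsl", b4)]⟩ part
      = ⟨[("arabinose", b1 || pvHit ["arabinose", "pbad"] part),
          ("iptg", b2 || pvHit ["iptg", "ptac", "plac"] part),
          ("atc", b3 || pvHit ["atc", "ptet"] part),
          ("hsl", b4 || pvHit ["hsl", "plux"] part)]⟩ := by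
  unfold pvStepA pvHit pvPartId
  cases h1 : List.any ["arabinose", "pbad"] (fun term => PySem.Str.isIn term (PySem.Str.lower (PySem.Dict.getD ⟨part⟩ "id" (PySem.Dict.getD ⟨part⟩ "name" "")))) <;>
  cases h2 : List.any ["iptg", "ptac", "plac"] (fun term => PySem.Str.isIn term (PySem.Str.lower (PySem.Dict.getD ⟨part⟩ "id" (PySem.Dict.getD ⟨part⟩ "name" "")))) <;>
  cases h3 : List.any ["atc", "ptet"] (fun term => PySem.Str.isIn term (PySem.Str.lower (PySem.Dict.getD ⟨part⟩ "id" (PySem.Dict.getD ⟨part⟩ "name" "")))) <;>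
  cases h4 : List.any ["hsl", "plux"] (fun term => PySem.Str.isIn term (PySem.Str.lower (PySem.Dict.getD ⟨part⟩ "id" (PySem.Dict.getD ⟨part⟩ "name" "")))) <;>
  all_goals simp only [h1, h2, h3, h4]; simp [PySem.Dict.insert]

lemma pvFoldA (parts : List (List (String × String))) (b1 b2 b3 b4 : Bool) :
    (parts.foldl pvStepA ⟨[("arabinose", b1), ("iptg", b2), ("atc", b3), ("hsl", b4)]⟩).items
      = [("arabinose", b1 || (parts.map pvPartId).any (fun pid => List.any ["arabinose", "pbad"] (fun term => PySem.Str.isIn term pid))),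
         ("iptg", b2 || (parts.map pvPartId).any (fun pid => List.any ["iptg", "ptac", "plac"] (fun term => PySem.Str.isIn term pid))),
         ("atc", b3 || (parts.map pvPartId).any (fun pid => List.any ["atc", "ptet"] (fun term => PySem.Str.isIn term pid))),
         ("hsl", b4 || (parts.map pvPartId).any (fun pid => List.any ["hsl", "plux"] (fun term => PySem.Str.isIn term pid)))] := by
  induction parts generalizing b1 b2 b3 b4 with
  | nil => simp
  | cons p ps ih =>
      rw [List.foldl_cons, pvStepA_eval, ih]
      simp [pvHit, Bool.or_assoc]

-- a prefix of xs ++ c :: ys that avoids c stays inside xs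
lemma pvPrefix_no_sep {α : Type} (c : α) (t xs ys : List α) (hc : c ∉ t)
    (h : t <+: xs ++ c :: ys) : t <+: xs := by
  have hlen : t.length ≤ xs.length := by
    by_contra hlt
    push Not at hlt
    have hx : xs.length < t.length := hlt
    have hg := h.getElem (i := xs.length) hx
    have hc' : t[xs.length] = c := by
      rw [hg, List.getElem_append_right (le_refl xs.length)]
      simp
    exact hc (hc' ▸ List.getElem_mem hx)
  rw [List.prefix_iff_eq_take] at h ⊢
  rw [h, List.take_append_of_le_length hlen]
  simp [List.length_take, Nat.min_eq_left hlen]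

-- an occurrence of t (with c ∉ t, t ≠ []) in xs ++ c :: ys lies wholly in xs or in ys
lemma pvInfix_append_sep {α : Type} (c : α) (t : List α) (hc : c ∉ t) (ht : t ≠ [])
    (xs ys : List α) : t <:+: xs ++ c :: ys ↔ (t <:+: xs ∨ t <:+: ys) := by
  constructor
  · intro h
    induction xs with
    | nil =>
        simp only [List.nil_append] at h
        rcases List.infix_cons_iff.mp h with hpre | hinf
        · cases t with
          | nil => exact absurd rfl ht
          | cons a t' =>
              rcases List.cons_prefix_cons.mp hpre with ⟨rfl, _⟩
              exact absurd List.mem_cons_self hc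
        · exact Or.inr hinf
    | cons x xs' ih =>
        rcases List.infix_cons_iff.mp h with hpre | hinf
        · exact Or.inl (pvPrefix_no_sep c t (x :: xs') ys hc (by simpa using hpre)).isInfix
        · rcases ih hinf with h1 | h2
          · exact Or.inl (List.infix_cons_iff.mpr (Or.inr h1))
          · exact Or.inr h2
  · rintro (h | h)
    · exact h.trans (List.prefix_append xs (c :: ys)).isInfix
    · exact (List.infix_cons_iff.mpr (Or.inr h)).trans
        (List.suffix_append xs (c :: ys)).isInfix

lemma pvInfix_join (c : Char) (t : List Char) (hc : c ∉ t) (ht : t ≠ [])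
    (xs : List (List Char)) :
    t <:+: PySem.Chars.join [c] xs ↔ ∃ x ∈ xs, t <:+: x := by
  induction xs with
  | nil =>
      simp only [PySem.Chars.join]
      constructor
      · intro h; exact absurd (List.eq_nil_of_infix_nil (by simpa [List.intercalate] using h)) ht
      · rintro ⟨x, hx, -⟩; simp at hx
  | cons x rest ih =>
      cases rest with
      | nil =>
          simp [PySem.Chars.join, List.intercalate]
      | cons y rest' =>
          rw [PySem.Chars.join_cons_cons, List.append_assoc]
          have : ([c] : List Char) ++ PySem.Chars.join [c] (y :: rest') = c :: PySem.Chars.join [c] (y :: rest') := rfl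
          rw [this, pvInfix_append_sep c t hc ht, ih]
          simp

lemma pvIsIn_join (t : String) (hc : '\n' ∉ t.toList) (ht : t.toList ≠ [])
    (ids : List String) :
    PySem.Str.isIn t (PySem.Str.join "\n" ids) = ids.any (fun id => PySem.Str.isIn t id) := by
  rw [Bool.eq_iff_iff]
  rw [PySem.Str.isIn_iff_infix, PySem.Str.toList_join]
  have hsep : ("\n" : String).toList = ['\n'] := by decide
  rw [hsep, pvInfix_join '\n' t.toList hc ht, List.any_eq_true]
  constructor
  · rintro ⟨x, hx, hinf⟩
    rcases List.mem_map.mp hx with ⟨id, hid, rfl⟩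
    exact ⟨id, hid, (PySem.Str.isIn_iff_infix t id).mpr hinf⟩
  · rintro ⟨id, hid, hin⟩
    exact ⟨id.toList, List.mem_map.mpr ⟨id, hid, rfl⟩, (PySem.Str.isIn_iff_infix t id).mp hin⟩

-- swap the quantifiers: id-major double scan = term-major scan of the joined haystack
lemma pvGroup_eq (terms : List String) (hterms : ∀ t ∈ terms, '\n' ∉ t.toList ∧ t.toList ≠ [])
    (ids : List String) :
    ids.any (fun pid => terms.any (fun term => PySem.Str.isIn term pid))
      = terms.any (fun term => PySem.Str.isIn term (PySem.Str.join "\n" ids)) := by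
  rw [Bool.eq_iff_iff]
  simp only [List.any_eq_true]
  constructor
  · rintro ⟨pid, hpid, term, hterm, hin⟩
    refine ⟨term, hterm, ?_⟩
    rw [pvIsIn_join term (hterms term hterm).1 (hterms term hterm).2, List.any_eq_true]
    exact ⟨pid, hpid, hin⟩
  · rintro ⟨term, hterm, hin⟩
    rw [pvIsIn_join term (hterms term hterm).1 (hterms term hterm).2, List.any_eq_true] at hin
    rcases hin with ⟨pid, hpid, hin⟩
    exact ⟨pid, hpid, term, hterm, hin⟩

theorem pv_main (library_data : List (String × List (List (String × String)))) :
    has_inducers_py library_data = has_inducers_py_alt library_data := by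
  unfold has_inducers_py has_inducers_py_alt
  have hof : PySem.Dict.ofList [("arabinose", false), ("iptg", false), ("atc", false), ("hsl", false)]
      = (⟨[("arabinose", false), ("iptg", false), ("atc", false), ("hsl", false)]⟩ : PySem.Dict String Bool) := by decide
  rw [hof, pvFoldA]
  set parts := (match PySem.Dict.get? ⟨library_data⟩ "parts" with
    | some parts_data => parts_data
    | none => []) with hp
  simp only [pvGroups, List.map_cons, List.map_nil]
  have h1 := pvGroup_eq ["arabinose", "pbad"] (by decide) (parts.map pvPartId)
  have h2 := pvGroup_eq ["iptg", "ptac", "plac"] (by decide) (parts.map pvPartId)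
  have h3 := pvGroup_eq ["atc", "ptet"] (by decide) (parts.map pvPartId)
  have h4 := pvGroup_eq ["hsl", "plux"] (by decide) (parts.map pvPartId)
  simp only [h1, h2, h3, h4, Bool.false_or]

-- ===== VERDICT (by name: the statement is the Claim_ definition above) =====
theorem has_inducers_py_spec : Claim_equal_has_inducers_py := by
  intro library_data _
  unfold Spec_has_inducers_py
  exact pv_main library_data
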